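-- pv_equiv track=rewrite | github.com/Din974/My_projects | 99problem/morning_sunshine/solution.py | morning_sunshine
-- ===== SOURCE A (Python) =====
-- from typing import List
--
-- def morning_sunshine(numbers: List[int]) -> List[int]:
--     if len(numbers) == 0:
--         return []
--
--     new = []
--     numbers = list(reversed(numbers))
--     max_v = numbers[0]
--
--     new.append(max_v)
--     for nb in numbers:
--         if nb > max_v:
--             new.append(nb)
--             max_v = nb
--     return list(reversed(new))
-- ===== SOURCE B (Python) =====
-- from typing import List
--
-- def morning_sunshine(numbers: List[int]) -> List[int]:
--     # keep each element that is strictly greater than every element after it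
--     return [x for i, x in enumerate(numbers) if all(x > y for y in numbers[i+1:])]
-- ===== Notes on version B (the rewrite author's own statement) =====
-- stated objective: idiomatic
-- what changed: Replaces the double-reverse running-max loop with a one-line forward comprehension that keeps an element iff it exceeds every later element.
import Mathlib
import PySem

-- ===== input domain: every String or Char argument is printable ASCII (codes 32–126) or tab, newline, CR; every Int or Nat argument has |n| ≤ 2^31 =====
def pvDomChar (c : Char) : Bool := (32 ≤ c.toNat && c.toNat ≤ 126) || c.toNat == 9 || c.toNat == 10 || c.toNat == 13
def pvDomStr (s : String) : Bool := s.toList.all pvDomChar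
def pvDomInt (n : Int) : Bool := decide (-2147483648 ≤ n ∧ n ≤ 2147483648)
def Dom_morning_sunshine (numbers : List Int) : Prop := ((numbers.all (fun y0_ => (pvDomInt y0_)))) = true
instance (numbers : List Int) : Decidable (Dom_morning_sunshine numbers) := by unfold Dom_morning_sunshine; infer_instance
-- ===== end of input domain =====

-- B: idiomatic forward filter (element kept iff greater than every later element) instead of A's double-reverse running-max loop; same return value.

-- ===== PORT A =====
-- the 'for nb in numbers' loop: state = (new, max_v), appending nb when nb > max_v
def msLoop : List Int → List Int → Int → (List Int × Int)
  | [], new, m => (new, m)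
  | nb :: rest, new, m =>
      if m < nb then msLoop rest (new ++ [nb]) nb else msLoop rest new m

def morning_sunshine (numbers : List Int) : List Int :=
  match numbers.reverse with
  | [] => []                                  -- the len(numbers)==0 early return
  | m0 :: rest => ((msLoop (m0 :: rest) ([] ++ [m0]) m0).1).reverse

-- ===== PORT B =====
-- transcription of the comprehension: x kept iff all later elements y satisfy x > y
def morning_sunshine_alt (numbers : List Int) : List Int :=
  match numbers with
  | [] => []
  | x :: xs =>
      (if xs.all (fun y => decide (y < x)) then [x] else []) ++ morning_sunshine_alt xs

-- ===== PRECONDITION & SPEC =====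
def Spec_morning_sunshine (numbers : List Int) (out : List Int) : Prop := out = morning_sunshine_alt numbers
instance (numbers : List Int) (out : List Int) : Decidable (Spec_morning_sunshine numbers out) := by unfold Spec_morning_sunshine; infer_instance

-- ===== CLAIM (what is proved, stated in full; the proofs are below) =====
def Claim_equal_morning_sunshine : Prop := ∀ (numbers : List Int), Dom_morning_sunshine numbers → Spec_morning_sunshine numbers (morning_sunshine numbers)

-- ===== LEMMAS AND PROOFS =====

-- the elements A's loop collects (without the accumulator)
def scanA : List Int → Int → List Int
  | [], _ => []
  | x :: xs, m => if m < x then x :: scanA xs x else scanA xs m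

lemma msLoop_fst : ∀ (l new : List Int) (m : Int),
    (msLoop l new m).1 = new ++ scanA l m := by
  intro l
  induction l with
  | nil => intro new m; simp [msLoop, scanA]
  | cons x xs ih =>
      intro new m
      by_cases h : m < x <;> simp [msLoop, scanA, h, ih]

-- B's filter bounded below by m: x kept iff m < x and x beats every later element
def altB : List Int → Int → List Int
  | [], _ => []
  | x :: xs, m =>
      (if decide (m < x) && xs.all (fun y => decide (y < x)) then [x] else []) ++ altB xs m

lemma altB_append : ∀ (l : List Int) (a m : Int),
    altB (l ++ [a]) m = altB l (max m a) ++ (if m < a then [a] else []) := by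
  intro l
  induction l with
  | nil => intro a m; by_cases h : m < a <;> simp [altB, h]
  | cons x xs ih =>
      intro a m
      have hmax : max m a < x ↔ (m < x ∧ a < x) := max_lt_iff
      have hc : (decide (m < x) && ((xs.all fun y => decide (y < x)) && decide (a < x)))
          = (decide (max m a < x) && xs.all fun y => decide (y < x)) := by
        by_cases h1 : m < x <;> by_cases h2 : a < x <;>
          simp [h1, h2, hmax]
      simp only [List.cons_append, altB, List.all_append, List.all_cons, List.all_nil,
        Bool.and_true, ih, hc, List.append_assoc]

lemma alt_append : ∀ (l : List Int) (a : Int),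
    morning_sunshine_alt (l ++ [a]) = altB l a ++ [a] := by
  intro l
  induction l with
  | nil => intro a; simp [morning_sunshine_alt, altB]
  | cons x xs ih =>
      intro a
      simp only [List.cons_append, morning_sunshine_alt, altB, List.all_append,
        List.all_cons, List.all_nil, Bool.true_and, ih, List.append_assoc,
        Bool.and_comm]

lemma altB_rev_scanA : ∀ (r : List Int) (m : Int),
    altB r.reverse m = (scanA r m).reverse := by
  intro r
  induction r with
  | nil => intro m; simp [altB, scanA]
  | cons x xs ih =>
      intro m
      by_cases h : m < x
      · have hm : max m x = x := by omega
        simp [scanA, altB_append, h, hm, ih]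
      · have hm : max m x = m := by omega
        simp [scanA, altB_append, h, hm, ih]

-- ===== VERDICT (by name: the statement is the Claim_ definition above) =====
theorem morning_sunshine_spec : Claim_equal_morning_sunshine := by
  intro numbers _
  unfold Spec_morning_sunshine
  cases hrev : numbers.reverse with
  | nil =>
      have : numbers = [] := by
        simpa using congrArg List.reverse hrev
      simp [this, morning_sunshine, morning_sunshine_alt]
  | cons m0 rest =>
      have hn : numbers = rest.reverse ++ [m0] := by
        have := congrArg List.reverse hrev
        simpa using this
      have hMS : morning_sunshine numbers
          = ((msLoop (m0 :: rest) ([] ++ [m0]) m0).1).reverse := by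
        unfold morning_sunshine
        rw [hrev]
      have hA : ((msLoop (m0 :: rest) ([] ++ [m0]) m0).1).reverse
          = (scanA rest m0).reverse ++ [m0] := by
        simp [msLoop_fst, msLoop]
      rw [hMS, hA, hn, alt_append, altB_rev_scanA]
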